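-- pv_equiv track=rewrite | github.com/smailliwhtes/Investment-Project | market_app/market_monitor/fred.py | _resolve_value_column
-- ===== SOURCE A (Python) =====
-- def _resolve_value_column(columns: list[str]) -> str | None:
--     candidates = {column.lower(): column for column in columns}
--     for key in ("value", "close", "observation_value"):
--         if key in candidates:
--             return candidates[key]
--     for column in columns:
--         if column.lower() != "date":
--             return column
--     return None
-- ===== SOURCE B (Python) =====
-- PRIORITY = ("value", "close", "observation_value")
--
--
-- def _resolve_value_column(columns: list[str]) -> str | None:
--     best = None
--     best_rank = len(PRIORITY)
--     fallback = None
--     for column in columns: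
--         low = column.lower()
--         if low in PRIORITY:
--             rank = PRIORITY.index(low)
--             if rank < best_rank:
--                 best_rank, best = rank, column
--         elif fallback is None and low != "date":
--             fallback = column
--     return best if best is not None else fallback
-- ===== Notes on version B (the rewrite author's own statement) =====
-- stated objective: alternative
-- what changed: Replaces the lowercase dict plus staged key lookups and a second fallback loop by a single forward pass that keeps the best-ranked priority match and the first non-'date' fallback in accumulators; Pre_ excludes lists with two distinct spellings that lowercase to the same priority key, where the dict's last-wins pick vs the scan's first-wins pick are both defensible accidents.
-- outside the precondition, e.g. on _resolve_value_column(['Value', 'VALUE']): A returns 'VALUE', B returns 'Value'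
import Mathlib
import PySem

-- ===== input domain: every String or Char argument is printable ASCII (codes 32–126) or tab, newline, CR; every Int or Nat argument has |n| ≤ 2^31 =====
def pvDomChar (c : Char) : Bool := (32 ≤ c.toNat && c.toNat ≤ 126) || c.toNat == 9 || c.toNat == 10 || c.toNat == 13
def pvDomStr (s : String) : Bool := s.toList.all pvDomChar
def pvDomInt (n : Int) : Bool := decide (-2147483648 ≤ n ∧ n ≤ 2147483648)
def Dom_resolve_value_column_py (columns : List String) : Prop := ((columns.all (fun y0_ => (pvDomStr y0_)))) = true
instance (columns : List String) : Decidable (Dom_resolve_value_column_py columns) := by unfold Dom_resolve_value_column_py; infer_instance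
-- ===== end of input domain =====

-- B replaces the lowercase dict and its staged lookups by a single forward pass with two
-- accumulators (best-ranked priority match, first non-'date' fallback); same cost.

-- ===== PORT A =====
def resolve_value_column_py (columns : List String) : Option String :=
  let candidates := columns.foldl (fun d c => d.insert (PySem.Str.lower c) c) PySem.Dict.empty
  match ["value", "close", "observation_value"].findSome? (fun k => candidates.get? k) with
  | some v => some v
  | none => columns.find? (fun c => PySem.Str.lower c != "date")

-- ===== PORT B =====
-- state: ((best_rank, best), fallback); best_rank starts at len(PRIORITY) = 3.
-- `PRIORITY.index(low)` is ported as `(index? …).getD 0`: under the `contains` guard the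
-- index is always `some`, matching Python, where `.index` cannot raise there.
def resolve_value_column_py_alt (columns : List String) : Option String :=
  let st := columns.foldl
    (fun (s : (Int × Option String) × Option String) column =>
      let low := PySem.Str.lower column
      if (["value", "close", "observation_value"] : List String).contains low then
        let rank : Int := ((PySem.List.index? ["value", "close", "observation_value"] low).getD 0 : Nat)
        if rank < s.1.1 then ((rank, some column), s.2) else s
      else if s.2.isNone && low != "date" then (s.1, some column)
      else s)
    ((3, none), none)
  match st.1.2 with
  | some c => some c
  | none => st.2

-- ===== PRECONDITION & SPEC =====
-- Pre_ excludes lists in which two DISTINCT spellings lowercase to the same priority key: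
-- there A's dict keeps the last spelling while B's scan keeps the first, both defensible
-- choices on a corner nobody would specify.
def Pre_resolve_value_column_py (columns : List String) : Prop :=
  ∀ a ∈ columns, ∀ b ∈ columns,
    PySem.Str.lower a = PySem.Str.lower b →
    PySem.Str.lower a ∈ (["value", "close", "observation_value"] : List String) →
    a = b
instance (columns : List String) : Decidable (Pre_resolve_value_column_py columns) := by
  unfold Pre_resolve_value_column_py; infer_instance

def pvWitness_resolve_value_column_py : List String := ["date", "Close", "extra"]

def Spec_resolve_value_column_py (columns : List String) (out : Option String) : Prop := out = resolve_value_column_py_alt columns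
instance (columns : List String) (out : Option String) : Decidable (Spec_resolve_value_column_py columns out) := by unfold Spec_resolve_value_column_py; infer_instance

-- ===== CLAIM (what is proved, stated in full; the proofs are below) =====
def Claim_equal_resolve_value_column_py : Prop := ∀ (columns : List String), Dom_resolve_value_column_py columns → Pre_resolve_value_column_py columns → Spec_resolve_value_column_py columns (resolve_value_column_py columns)

-- ===== LEMMAS AND PROOFS =====

-- A's dict answers get? k with the LAST column whose lowercase is k.
theorem dict_get_eq_rev_find (l : List String) (d : PySem.Dict String String) (k : String) :
    (l.foldl (fun d c => d.insert (PySem.Str.lower c) c) d).get? k =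
      (l.reverse.find? (fun c => PySem.Str.lower c == k)).orElse (fun _ => d.get? k) := by
  induction l generalizing d with
  | nil => simp
  | cons c t ih =>
    simp only [List.foldl_cons, List.reverse_cons, List.find?_append, ih]
    cases h : t.reverse.find? (fun c => PySem.Str.lower c == k) with
    | some v => simp [Option.orElse, h]
    | none =>
      simp only [Option.orElse, List.find?, PySem.Dict.get?_insert]
      by_cases hk : PySem.Str.lower c == k
      · have hkeq : k = PySem.Str.lower c := (eq_of_beq hk).symm
        simp [hk, hkeq]
      · have hne : k ≠ PySem.Str.lower c := fun e => hk (by simp [e])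
        simp [hk, hne]

-- If all satisfiers of p in l are equal, searching from either end agrees.
theorem find?_reverse_of_unique {α : Type} (l : List α) (p : α → Bool)
    (h : ∀ a ∈ l, ∀ b ∈ l, p a → p b → a = b) :
    l.reverse.find? p = l.find? p := by
  cases hf : l.find? p with
  | none =>
    rw [List.find?_eq_none] at hf ⊢
    intro x hx; exact hf x (List.mem_reverse.mp hx)
  | some a =>
    have ha : a ∈ l := List.mem_of_find?_eq_some hf
    have hpa : p a := List.find?_some hf
    have : (l.reverse.find? p).isSome := by
      rw [List.find?_isSome]; exact ⟨a, List.mem_reverse.mpr ha, hpa⟩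
    cases hg : l.reverse.find? p with
    | none => rw [hg] at this; simp at this
    | some b =>
      have hb : b ∈ l := List.mem_reverse.mp (List.mem_of_find?_eq_some hg)
      have hpb : p b := List.find?_some hg
      rw [h b hb a ha hpb hpa]

-- the two per-element state updates B's single pass performs, split into components
def stepBest (s : Int × Option String) (c : String) : Int × Option String :=
  let low := PySem.Str.lower c
  if (["value", "close", "observation_value"] : List String).contains low then
    let rank : Int := ((PySem.List.index? ["value", "close", "observation_value"] low).getD 0 : Nat)
    if rank < s.1 then (rank, some c) else s
  else s

def stepFall (fb : Option String) (c : String) : Option String :=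
  let low := PySem.Str.lower c
  if (["value", "close", "observation_value"] : List String).contains low then fb
  else if fb.isNone && low != "date" then some c else fb

theorem fold_split (cols : List String) (s : (Int × Option String) × Option String) :
    cols.foldl
      (fun (s : (Int × Option String) × Option String) column =>
        let low := PySem.Str.lower column
        if (["value", "close", "observation_value"] : List String).contains low then
          let rank : Int := ((PySem.List.index? ["value", "close", "observation_value"] low).getD 0 : Nat)
          if rank < s.1.1 then ((rank, some column), s.2) else s
        else if s.2.isNone && low != "date" then (s.1, some column)
        else s) s
    = (cols.foldl stepBest s.1, cols.foldl stepFall s.2) := by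
  induction cols generalizing s with
  | nil => rfl
  | cons c t ih =>
    rw [List.foldl_cons, List.foldl_cons, List.foldl_cons, ih]
    congr 1 <;>
    · obtain ⟨⟨br, b⟩, fb⟩ := s
      simp only [stepBest, stepFall]
      split_ifs <;> rfl

-- first column achieving the minimal priority rank, as a staged search
def minOf (cols : List String) : Option (Int × String) :=
  match cols.find? (fun c => PySem.Str.lower c == "value") with
  | some c => some (0, c)
  | none =>
    match cols.find? (fun c => PySem.Str.lower c == "close") with
    | some c => some (1, c)
    | none =>
      match cols.find? (fun c => PySem.Str.lower c == "observation_value") with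
      | some c => some (2, c)
      | none => none

-- fold a candidate minimum into the current best (strict improvement only)
def combine (br : Int) (b : Option String) (m : Option (Int × String)) : Int × Option String :=
  match m with
  | none => (br, b)
  | some (mr, mc) => if mr < br then (mr, some mc) else (br, b)

theorem minOf_nonneg (cols : List String) (mr : Int) (mc : String)
    (h : minOf cols = some (mr, mc)) : 0 ≤ mr ∧ mr < 3 := by
  unfold minOf at h
  cases h0 : cols.find? (fun c => PySem.Str.lower c == "value") <;> rw [h0] at h
  · cases h1 : cols.find? (fun c => PySem.Str.lower c == "close") <;> rw [h1] at h
    · cases h2 : cols.find? (fun c => PySem.Str.lower c == "observation_value") <;> rw [h2] at h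
      · simp at h
      · simp at h; omega
    · simp at h; omega
  · simp at h; omega

theorem foldBest_eq (cols : List String) : ∀ br b,
    cols.foldl stepBest (br, b) = combine br b (minOf cols) := by
  induction cols with
  | nil => intro br b; rfl
  | cons c t ih =>
    intro br b
    rw [List.foldl_cons]
    by_cases hv : PySem.Str.lower c = "value"
    · have hstep : stepBest (br, b) c = if (0:Int) < br then ((0:Int), some c) else (br, b) := by
        simp [stepBest, hv, PySem.List.index?]
      have h1 : minOf (c :: t) = some (0, c) := by
        simp [minOf, List.find?_cons, hv]
      rw [hstep, h1]
      split_ifs with hbr <;> rw [ih] <;>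
        rcases hm : minOf t with _ | ⟨mr, mc⟩
      · simp only [combine]; rw [if_pos hbr]
      · have := minOf_nonneg t mr mc hm
        simp only [combine]; rw [if_neg (by omega), if_pos hbr]
      · simp only [combine]; rw [if_neg hbr]
      · have := minOf_nonneg t mr mc hm
        simp only [combine]; rw [if_neg (by omega), if_neg hbr]
    · by_cases hc : PySem.Str.lower c = "close"
      · have hidx : List.idxOf? "close" ["value", "close", "observation_value"] = some 1 := by decide
        have hstep : stepBest (br, b) c = if (1:Int) < br then ((1:Int), some c) else (br, b) := by
          simp [stepBest, hc, hidx]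
        have hfv : (c :: t).find? (fun x => PySem.Str.lower x == "value")
            = t.find? (fun x => PySem.Str.lower x == "value") := by
          rw [List.find?_cons_of_neg]; simp [hc]
        cases h0f : t.find? (fun x => PySem.Str.lower x == "value") with
        | some v =>
          have h1 : minOf (c :: t) = some (0, v) := by simp [minOf, hfv, h0f]
          have h2 : minOf t = some (0, v) := by simp [minOf, h0f]
          rw [hstep, h1]
          split_ifs with hbr <;> rw [ih, h2] <;> simp only [combine] <;>
            split_ifs <;> first | rfl | (exfalso; omega)
        | none =>
          have h1 : minOf (c :: t) = some (1, c) := by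
            simp [minOf, hfv, h0f, List.find?_cons, hc]
          cases h1f : t.find? (fun x => PySem.Str.lower x == "close") with
          | some w =>
            have h2 : minOf t = some (1, w) := by simp [minOf, h0f, h1f]
            rw [hstep, h1]
            split_ifs with hbr <;> rw [ih, h2] <;> simp only [combine] <;>
              split_ifs <;> first | rfl | (exfalso; omega)
          | none =>
            cases h2f : t.find? (fun x => PySem.Str.lower x == "observation_value") with
            | some w =>
              have h2 : minOf t = some (2, w) := by simp [minOf, h0f, h1f, h2f]
              rw [hstep, h1]
              split_ifs with hbr <;> rw [ih, h2] <;> simp only [combine] <;>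
                split_ifs <;> first | rfl | (exfalso; omega)
            | none =>
              have h2 : minOf t = none := by simp [minOf, h0f, h1f, h2f]
              rw [hstep, h1]
              split_ifs with hbr <;> rw [ih, h2] <;> simp only [combine] <;>
                split_ifs <;> first | rfl | (exfalso; omega)
      · by_cases ho : PySem.Str.lower c = "observation_value"
        · have hidx : List.idxOf? "observation_value" ["value", "close", "observation_value"] = some 2 := by decide
          have hstep : stepBest (br, b) c = if (2:Int) < br then ((2:Int), some c) else (br, b) := by
            simp [stepBest, ho, hidx]
          have hfv : (c :: t).find? (fun x => PySem.Str.lower x == "value")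
              = t.find? (fun x => PySem.Str.lower x == "value") := by
            rw [List.find?_cons_of_neg]; simp [ho]
          have hfc : (c :: t).find? (fun x => PySem.Str.lower x == "close")
              = t.find? (fun x => PySem.Str.lower x == "close") := by
            rw [List.find?_cons_of_neg]; simp [ho]
          cases h0f : t.find? (fun x => PySem.Str.lower x == "value") with
          | some v =>
            have h1 : minOf (c :: t) = some (0, v) := by simp [minOf, hfv, h0f]
            have h2 : minOf t = some (0, v) := by simp [minOf, h0f]
            rw [hstep, h1]
            split_ifs with hbr <;> rw [ih, h2] <;> simp only [combine] <;>
              split_ifs <;> first | rfl | (exfalso; omega)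
          | none =>
            cases h1f : t.find? (fun x => PySem.Str.lower x == "close") with
            | some w =>
              have h1 : minOf (c :: t) = some (1, w) := by simp [minOf, hfv, h0f, hfc, h1f]
              have h2 : minOf t = some (1, w) := by simp [minOf, h0f, h1f]
              rw [hstep, h1]
              split_ifs with hbr <;> rw [ih, h2] <;> simp only [combine] <;>
                split_ifs <;> first | rfl | (exfalso; omega)
            | none =>
              have h1 : minOf (c :: t) = some (2, c) := by
                simp [minOf, hfv, h0f, hfc, h1f, List.find?_cons, ho]
              cases h2f : t.find? (fun x => PySem.Str.lower x == "observation_value") with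
              | some w =>
                have h2 : minOf t = some (2, w) := by simp [minOf, h0f, h1f, h2f]
                rw [hstep, h1]
                split_ifs with hbr <;> rw [ih, h2] <;> simp only [combine] <;>
                  split_ifs <;> first | rfl | (exfalso; omega)
              | none =>
                have h2 : minOf t = none := by simp [minOf, h0f, h1f, h2f]
                rw [hstep, h1]
                split_ifs with hbr <;> rw [ih, h2] <;> simp only [combine] <;>
                  split_ifs <;> first | rfl | (exfalso; omega)
        · have hcon : (["value", "close", "observation_value"] : List String).contains (PySem.Str.lower c) = false := by
            simp [hv, hc, ho]
          have hstep : stepBest (br, b) c = (br, b) := by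
            simp only [stepBest]; rw [hcon]; simp
          have h1 : minOf (c :: t) = minOf t := by
            simp [minOf, List.find?_cons, hv, hc, ho]
          rw [hstep, h1, ih]

theorem foldFall_eq (cols : List String) : ∀ fb,
    cols.foldl stepFall fb =
      match fb with
      | some v => some v
      | none => cols.find? (fun c =>
          !((["value", "close", "observation_value"] : List String).contains (PySem.Str.lower c)) &&
          PySem.Str.lower c != "date") := by
  induction cols with
  | nil => intro fb; cases fb <;> rfl
  | cons c t ih =>
    intro fb
    rw [List.foldl_cons]
    cases fb with
    | some v =>
      have : stepFall (some v) c = some v := by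
        simp [stepFall]
      rw [this, ih]
    | none =>
      by_cases hcon : (["value", "close", "observation_value"] : List String).contains (PySem.Str.lower c) = true
      · have hstep : stepFall none c = none := by
          simp only [stepFall]; rw [hcon]; simp
        rw [hstep, ih, List.find?_cons_of_neg]
        intro h
        rw [hcon] at h
        simp at h
      · have hconf : (["value", "close", "observation_value"] : List String).contains (PySem.Str.lower c) = false :=
          Bool.eq_false_iff.mpr hcon
        by_cases hd : PySem.Str.lower c = "date"
        · have hstep : stepFall none c = none := by
            simp only [stepFall]; rw [hconf, hd]; simp
          rw [hstep, ih, List.find?_cons_of_neg]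
          simp [hd]
        · have hstep : stepFall none c = some c := by
            simp only [stepFall]; rw [hconf]; simp [hd]
          rw [hstep, List.find?_cons_of_pos]
          · rw [ih]
          · rw [Bool.and_eq_true, hconf]
            refine ⟨rfl, ?_⟩
            simp [hd]

theorem find?_congr' {α : Type} (l : List α) (p q : α → Bool)
    (h : ∀ a ∈ l, p a = q a) : l.find? p = l.find? q := by
  induction l with
  | nil => rfl
  | cons c t ih =>
    rw [List.find?_cons, List.find?_cons, h c (by simp)]
    cases q c
    · exact ih (fun a ha => h a (by simp [ha]))
    · rfl

-- B's port, evaluated through the two component folds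
theorem alt_eq (cols : List String) :
    resolve_value_column_py_alt cols =
      match minOf cols with
      | some (_, c) => some c
      | none => cols.find? (fun c =>
          !((["value", "close", "observation_value"] : List String).contains (PySem.Str.lower c)) &&
          PySem.Str.lower c != "date") := by
  unfold resolve_value_column_py_alt
  rw [fold_split, foldBest_eq, foldFall_eq]
  rcases hm : minOf cols with _ | ⟨mr, mc⟩
  · simp [combine]
  · have := minOf_nonneg cols mr mc hm
    simp only [combine]
    rw [if_pos (by omega)]

-- ===== VERDICT (by name: the statement is the Claim_ definition above) =====
theorem resolve_value_column_py_spec : Claim_equal_resolve_value_column_py := by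
  intro cols _ hpre
  unfold Spec_resolve_value_column_py
  rw [alt_eq]
  unfold resolve_value_column_py
  have hdict : ∀ k, k ∈ (["value", "close", "observation_value"] : List String) →
      (cols.foldl (fun d c => d.insert (PySem.Str.lower c) c) PySem.Dict.empty).get? k =
      cols.find? (fun c => PySem.Str.lower c == k) := by
    intro k hk
    rw [dict_get_eq_rev_find]
    rw [find?_reverse_of_unique cols _ (fun a ha b hb hpa hpb => by
      have ea : PySem.Str.lower a = k := eq_of_beq hpa
      have eb : PySem.Str.lower b = k := eq_of_beq hpb
      exact hpre a ha b hb (ea.trans eb.symm) (ea ▸ hk))]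
    cases hf : cols.find? (fun c => PySem.Str.lower c == k) <;> simp [Option.orElse]
  simp only [List.findSome?_cons, List.findSome?_nil,
    hdict "value" (by simp), hdict "close" (by simp), hdict "observation_value" (by simp)]
  cases h0 : cols.find? (fun c => PySem.Str.lower c == "value") with
  | some v => simp [minOf, h0]
  | none =>
    cases h1 : cols.find? (fun c => PySem.Str.lower c == "close") with
    | some v => simp [minOf, h0, h1]
    | none =>
      cases h2 : cols.find? (fun c => PySem.Str.lower c == "observation_value") with
      | some v => simp [minOf, h0, h1, h2]
      | none =>
        simp only [minOf, h0, h1, h2]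
        have hnone : ∀ a ∈ cols,
            (["value", "close", "observation_value"] : List String).contains (PySem.Str.lower a) = false := by
          intro a ha
          rw [List.find?_eq_none] at h0 h1 h2
          have e0 := h0 a ha; have e1 := h1 a ha; have e2 := h2 a ha
          simp at e0 e1 e2
          simp [e0, e1, e2]
        exact find?_congr' cols (fun c => PySem.Str.lower c != "date")
          (fun c => !((["value", "close", "observation_value"] : List String).contains (PySem.Str.lower c)) &&
            PySem.Str.lower c != "date")
          (fun a ha => by
            show (PySem.Str.lower a != "date") =
              (!((["value", "close", "observation_value"] : List String).contains (PySem.Str.lower a)) &&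
                PySem.Str.lower a != "date")
            rw [hnone a ha, Bool.not_false, Bool.true_and])
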